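-- pv_equiv track=rewrite | github.com/irmankim711/prototype | backend/app/services/excel_parser.py | _get_table_range
-- ===== SOURCE A (Python) =====
-- from typing import List, Dict, Any, Tuple, Optional, Union
--
-- def _get_table_range(block: List[Tuple[int, int]]) -> str:
--     """Get Excel-style range for a table block."""
--     if not block:
--         return ""
--
--     min_row = min(cell[0] for cell in block) + 1  # Convert to 1-based
--     max_row = max(cell[0] for cell in block) + 1
--     min_col = min(cell[1] for cell in block)
--     max_col = max(cell[1] for cell in block)
--
--     def col_to_letter(col_num):
--         result = ""
--         while col_num >= 0:
--             result = chr(col_num % 26 + ord('A')) + result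
--             col_num = col_num // 26 - 1
--         return result
--
--     start_cell = f"{col_to_letter(min_col)}{min_row}"
--     end_cell = f"{col_to_letter(max_col)}{max_row}"
--
--     return f"{start_cell}:{end_cell}"
-- ===== SOURCE B (Python) =====
-- def _col_letters(n):
--     # bijective base-26 column letters; columns below zero have no letters
--     if n < 0:
--         return ""
--     q, r = divmod(n, 26)
--     return _col_letters(q - 1) + chr(r + 65)
--
--
-- def _get_table_range(block):
--     """Excel-style range for a block: one pass maintaining all four extrema."""
--     if not block:
--         return ""
--     r0, c0 = block[0]
--     min_r = max_r = r0
--     min_c = max_c = c0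
--     for r, c in block[1:]:
--         if r < min_r:
--             min_r = r
--         if r > max_r:
--             max_r = r
--         if c < min_c:
--             min_c = c
--         if c > max_c:
--             max_c = c
--     return f"{_col_letters(min_c)}{min_r + 1}:{_col_letters(max_c)}{max_r + 1}"
-- ===== Notes on version B (the rewrite author's own statement) =====
-- stated objective: alternative
-- what changed: Replaces A's four separate min/max generator scans with a single seeded loop maintaining all four extrema at once, and replaces A's while-loop back-to-front string building of the column letters with a divmod-based recursion.
import Mathlib
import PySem

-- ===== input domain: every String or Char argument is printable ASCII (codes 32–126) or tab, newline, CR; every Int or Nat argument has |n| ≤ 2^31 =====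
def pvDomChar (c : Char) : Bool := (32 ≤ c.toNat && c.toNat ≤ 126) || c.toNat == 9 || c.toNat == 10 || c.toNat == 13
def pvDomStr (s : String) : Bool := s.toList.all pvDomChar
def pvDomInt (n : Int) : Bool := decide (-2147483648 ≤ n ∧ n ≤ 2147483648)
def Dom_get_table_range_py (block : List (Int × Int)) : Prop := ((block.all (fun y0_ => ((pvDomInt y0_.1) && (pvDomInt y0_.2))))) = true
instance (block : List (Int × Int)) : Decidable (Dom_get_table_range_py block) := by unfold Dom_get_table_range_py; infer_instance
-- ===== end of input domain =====

-- B replaces A's four separate min/max scans with one seeded pass over the block and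
-- builds the column letters by divmod recursion instead of a back-to-front while loop
-- (objective: alternative; same output everywhere).


-- ===== PORT A =====
-- A's inner while loop: result is built back to front, one letter prepended per step.
-- (strings are ported as List Char per the PySem convention; String.mk wraps at the end)
def colToLetterA (colNum : Int) (result : List Char) : List Char :=
  if h : colNum ≥ 0 then
    colToLetterA (PySem.Int.floordiv colNum 26 - 1)
      (Char.ofNat (PySem.Int.mod colNum 26 + 65).toNat :: result)
  else result
termination_by (colNum + 1).toNat
decreasing_by
  have h26 : PySem.Int.floordiv colNum 26 = colNum / 26 :=
    PySem.Int.floordiv_eq_ediv_of_pos (by norm_num)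
  have h1 : 0 ≤ colNum / 26 := Int.ediv_nonneg h (by norm_num)
  have h2 : colNum / 26 ≤ colNum := Int.ediv_le_self 26 h
  omega

-- min/max over empty lists is unreachable (A guards `if not block`); .getD 0 is a dead default
def get_table_range_py (block : List (Int × Int)) : String :=
  if block = [] then ""
  else
    let minRow := (PySem.List.min? (block.map (fun cell => cell.1)) (fun y => y)).getD 0 + 1
    let maxRow := (PySem.List.max? (block.map (fun cell => cell.1)) (fun y => y)).getD 0 + 1
    let minCol := (PySem.List.min? (block.map (fun cell => cell.2)) (fun y => y)).getD 0
    let maxCol := (PySem.List.max? (block.map (fun cell => cell.2)) (fun y => y)).getD 0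
    let startCell := colToLetterA minCol [] ++ PySem.Int.toChars minRow
    let endCell := colToLetterA maxCol [] ++ PySem.Int.toChars maxRow
    String.mk (startCell ++ [':'] ++ endCell)

-- ===== PORT B =====
-- B's divmod recursion for the column letters
def colLettersB (n : Int) : List Char :=
  if h : n < 0 then []
  else
    colLettersB (PySem.Int.floordiv n 26 - 1) ++ [Char.ofNat (PySem.Int.mod n 26 + 65).toNat]
termination_by (n + 1).toNat
decreasing_by
  have h26 : PySem.Int.floordiv n 26 = n / 26 :=
    PySem.Int.floordiv_eq_ediv_of_pos (by norm_num)
  have h1 : 0 ≤ n / 26 := Int.ediv_nonneg (by omega) (by norm_num)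
  have h2 : n / 26 ≤ n := Int.ediv_le_self 26 (by omega)
  omega

def get_table_range_py_alt (block : List (Int × Int)) : String :=
  match block with
  | [] => ""
  | (r0, c0) :: rest =>
    let st := rest.foldl
      (fun (st : Int × Int × Int × Int) (cell : Int × Int) =>
        ( if cell.1 < st.1 then cell.1 else st.1,
          if cell.1 > st.2.1 then cell.1 else st.2.1,
          if cell.2 < st.2.2.1 then cell.2 else st.2.2.1,
          if cell.2 > st.2.2.2 then cell.2 else st.2.2.2))
      (r0, r0, c0, c0)
    String.mk (colLettersB st.2.2.1 ++ PySem.Int.toChars (st.1 + 1) ++ [':']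
      ++ colLettersB st.2.2.2 ++ PySem.Int.toChars (st.2.1 + 1))

-- ===== PRECONDITION & SPEC =====
def Spec_get_table_range_py (block : List (Int × Int)) (out : String) : Prop := out = get_table_range_py_alt block
instance (block : List (Int × Int)) (out : String) : Decidable (Spec_get_table_range_py block out) := by unfold Spec_get_table_range_py; infer_instance

-- ===== CLAIM (what is proved, stated in full; the proofs are below) =====
def Claim_equal_get_table_range_py : Prop := ∀ (block : List (Int × Int)), Dom_get_table_range_py block → Spec_get_table_range_py block (get_table_range_py block)

-- ===== LEMMAS AND PROOFS =====

-- A's while loop equals B's recursion plus the accumulator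
theorem colToLetterA_eq (colNum : Int) (acc : List Char) :
    colToLetterA colNum acc = colLettersB colNum ++ acc := by
  by_cases h : colNum ≥ 0
  · rw [colToLetterA, colLettersB]
    simp only [h, dif_pos, not_lt.mpr h, dif_neg, not_false_iff]
    rw [colToLetterA_eq]
    simp
  · rw [colToLetterA, colLettersB]
    simp only [h, dif_neg, not_false_iff, dif_pos (by omega : colNum < 0)]
    simp
termination_by (colNum + 1).toNat
decreasing_by
  have h26 : PySem.Int.floordiv colNum 26 = colNum / 26 :=
    PySem.Int.floordiv_eq_ediv_of_pos (by norm_num)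
  have h1 : 0 ≤ colNum / 26 := Int.ediv_nonneg h (by norm_num)
  have h2 : colNum / 26 ≤ colNum := Int.ediv_le_self 26 h
  omega

-- B's if-chains are exactly running min/max updates
theorem step_eq :
    (fun (st : Int × Int × Int × Int) (cell : Int × Int) =>
        ( if cell.1 < st.1 then cell.1 else st.1,
          if cell.1 > st.2.1 then cell.1 else st.2.1,
          if cell.2 < st.2.2.1 then cell.2 else st.2.2.1,
          if cell.2 > st.2.2.2 then cell.2 else st.2.2.2))
    = (fun (st : Int × Int × Int × Int) (cell : Int × Int) =>
        (min st.1 cell.1, max st.2.1 cell.1, min st.2.2.1 cell.2, max st.2.2.2 cell.2)) := by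
  funext st cell
  simp only [Prod.mk.injEq]
  exact ⟨by split_ifs <;> omega, by split_ifs <;> omega,
         by split_ifs <;> omega, by split_ifs <;> omega⟩

-- B's single fold equals the four separate running folds
theorem fold4_eq (rest : List (Int × Int)) (a b c d : Int) :
    rest.foldl
      (fun (st : Int × Int × Int × Int) (cell : Int × Int) =>
        (min st.1 cell.1, max st.2.1 cell.1, min st.2.2.1 cell.2, max st.2.2.2 cell.2))
      (a, b, c, d)
    = (rest.foldl (fun x cell => min x cell.1) a,
       rest.foldl (fun x cell => max x cell.1) b,
       rest.foldl (fun x cell => min x cell.2) c,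
       rest.foldl (fun x cell => max x cell.2) d) := by
  induction rest generalizing a b c d with
  | nil => rfl
  | cons hd tl ih =>
    simp only [List.foldl_cons]
    exact ih _ _ _ _

theorem min_foldl_eq (x : Int) (t : List (Int × Int)) (f : Int × Int → Int) :
    (t.map f).foldl min x = t.foldl (fun a c => min a (f c)) x := by
  rw [List.foldl_map]

theorem max_foldl_eq (x : Int) (t : List (Int × Int)) (f : Int × Int → Int) :
    (t.map f).foldl max x = t.foldl (fun a c => max a (f c)) x := by
  rw [List.foldl_map]

-- ===== VERDICT (by name: the statement is the Claim_ definition above) =====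
theorem get_table_range_py_spec : Claim_equal_get_table_range_py := by
  intro block _
  unfold Spec_get_table_range_py
  match block with
  | [] => rfl
  | (r0, c0) :: rest =>
    unfold get_table_range_py get_table_range_py_alt
    simp only [List.map_cons, PySem.List.min?_id_cons, PySem.List.max?_id_cons,
      Option.getD_some, reduceCtorEq, if_false, step_eq, fold4_eq,
      min_foldl_eq, max_foldl_eq, colToLetterA_eq, List.append_nil]
    simp only [List.append_assoc]
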